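-- pv_equiv track=rewrite | github.com/sp8cky/Primes | src/acceleration/helpers.py | find_proth_decomposition_py
-- ===== SOURCE A (Python) =====
-- from typing import List, Optional, Tuple
--
-- def find_proth_decomposition_py(n: int) -> Tuple[int, int]:
--     if n <= 2 or n % 2 == 0:
--         return (-1, -1)
--     m = n - 1
--     e = 0
--     while m % 2 == 0:
--         m //= 2
--         e += 1
--     K = m
--     if K % 2 == 1:
--         return (K, e)
--     return (-1, -1)
-- ===== SOURCE B (Python) =====
-- def find_proth_decomposition_py(n):
--     if n <= 2 or n % 2 == 0:
--         return (-1, -1)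
--     m = n - 1
--     lsb = m & -m
--     e = lsb.bit_length() - 1
--     return (m >> e, e)
-- ===== Notes on version B (the rewrite author's own statement) =====
-- stated objective: idiomatic
-- what changed: Replaces the repeated-halving while loop with a loop-free bit trick: the lowest set bit m & -m gives the exponent e via bit_length, and K is a single shift m >> e; the trailing K-oddness re-check disappears (K is odd by construction).
import Mathlib
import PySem

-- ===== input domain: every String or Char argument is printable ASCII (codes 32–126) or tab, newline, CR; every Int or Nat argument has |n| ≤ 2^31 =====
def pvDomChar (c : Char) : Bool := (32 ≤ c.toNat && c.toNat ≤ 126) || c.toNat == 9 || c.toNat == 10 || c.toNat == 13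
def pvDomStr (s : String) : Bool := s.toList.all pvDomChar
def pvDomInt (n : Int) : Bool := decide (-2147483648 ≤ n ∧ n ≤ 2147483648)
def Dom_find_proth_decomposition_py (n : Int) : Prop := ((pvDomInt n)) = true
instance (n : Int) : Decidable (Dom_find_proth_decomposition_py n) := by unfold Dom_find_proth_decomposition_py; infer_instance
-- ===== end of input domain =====

-- B replaces A's repeated-halving loop with a loop-free lowest-set-bit computation (idiomatic bit trick); same return value everywhere.

-- ===== PORT A =====
-- A's while loop; the extra `0 < m` conjunct only makes the recursion total
-- (on every reachable state m ≥ 2, so it never changes the computed value;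
-- at an even m ≤ 0 Python would not terminate).
def prothLoopA (m e : Int) : Int × Int :=
  if h : PySem.Int.mod m 2 = 0 ∧ 0 < m then
    prothLoopA (PySem.Int.floordiv m 2) (e + 1)
  else (m, e)
termination_by m.toNat
decreasing_by
  rw [PySem.Int.floordiv_eq_ediv_of_pos (by omega : (0:Int) < 2)]
  omega

def find_proth_decomposition_py (n : Int) : Int × Int :=
  if n ≤ 2 ∨ PySem.Int.mod n 2 = 0 then (-1, -1)
  else
    let r := prothLoopA (n - 1) 0
    let K := r.1
    if PySem.Int.mod K 2 = 1 then (K, r.2) else (-1, -1)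

-- ===== PORT B =====
def find_proth_decomposition_py_alt (n : Int) : Int × Int :=
  if n ≤ 2 ∨ PySem.Int.mod n 2 = 0 then (-1, -1)
  else
    let m := n - 1
    let lsb := PySem.Int.band m (-m)                      -- m & -m
    let e : Int := (PySem.Int.bitLength lsb : Int) - 1    -- lsb.bit_length() - 1
    (m >>> e.toNat, e)                                    -- m >> e; e ≥ 0 whenever this line runs

-- ===== PRECONDITION & SPEC =====
def Spec_find_proth_decomposition_py (n : Int) (out : Int × Int) : Prop := out = find_proth_decomposition_py_alt n
instance (n : Int) (out : Int × Int) : Decidable (Spec_find_proth_decomposition_py n out) := by unfold Spec_find_proth_decomposition_py; infer_instance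

-- ===== CLAIM (what is proved, stated in full; the proofs are below) =====
def Claim_equal_find_proth_decomposition_py : Prop := ∀ (n : Int), Dom_find_proth_decomposition_py n → Spec_find_proth_decomposition_py n (find_proth_decomposition_py n)

-- ===== LEMMAS AND PROOFS =====

-- Nat.ldiff a (a-1) is the lowest set bit of a
theorem ldiff_of_odd (a : Nat) (ha : a % 2 = 1) : Nat.ldiff a (a - 1) = 1 := by
  apply Nat.eq_of_testBit_eq
  intro i
  cases i with
  | zero =>
    have h1 : (a - 1) % 2 = 0 := by omega
    rw [Nat.testBit_ldiff, Nat.testBit_zero, Nat.testBit_zero, Nat.testBit_zero, ha, h1]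
    decide
  | succ i =>
    rw [Nat.testBit_ldiff, Nat.testBit_succ, Nat.testBit_succ, Nat.testBit_succ]
    have h2 : (a - 1) / 2 = a / 2 := by omega
    rw [h2]
    simp [Nat.zero_testBit, Nat.div_eq_of_lt]

theorem ldiff_of_even (b : Nat) (hb : 0 < b) :
    Nat.ldiff (2 * b) (2 * b - 1) = 2 * Nat.ldiff b (b - 1) := by
  apply Nat.eq_of_testBit_eq
  intro i
  cases i with
  | zero =>
    have e1 : (2 * b) % 2 = 0 := by omega
    have e2 : (2 * Nat.ldiff b (b - 1)) % 2 = 0 := by omega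
    rw [Nat.testBit_ldiff, Nat.testBit_zero, Nat.testBit_zero, Nat.testBit_zero, e1, e2]
    simp
  | succ i =>
    rw [Nat.testBit_ldiff, Nat.testBit_succ, Nat.testBit_succ, Nat.testBit_succ]
    have h1 : 2 * b / 2 = b := by omega
    have h2 : (2 * b - 1) / 2 = b - 1 := by omega
    have h3 : 2 * Nat.ldiff b (b - 1) / 2 = Nat.ldiff b (b - 1) := by omega
    rw [h1, h2, h3, Nat.testBit_ldiff]

theorem ldiff_pos (b : Nat) (hb : 0 < b) : 0 < Nat.ldiff b (b - 1) := by
  induction b using Nat.strong_induction_on with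
  | _ b ih =>
    rcases Nat.even_or_odd b with he | ho
    · obtain ⟨c, hc⟩ := he
      have hc' : b = 2 * c := by omega
      subst hc'
      rw [ldiff_of_even c (by omega)]
      have := ih c (by omega) (by omega)
      omega
    · rw [ldiff_of_odd b (Nat.odd_iff.mp ho)]; omega

-- A's loop computes (a shifted past its trailing zeros, e + number of trailing zeros),
-- expressed through the lowest set bit Nat.ldiff a (a-1).
theorem prothLoopA_eq (a : Nat) (ha : 0 < a) (e : Int) :
    prothLoopA (a : Int) e =
      (((a >>> Nat.log2 (Nat.ldiff a (a - 1)) : Nat) : Int),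
       e + (Nat.log2 (Nat.ldiff a (a - 1)) : Int)) := by
  induction a using Nat.strong_induction_on generalizing e with
  | _ a ih =>
    rcases Nat.even_or_odd a with he | ho
    · obtain ⟨c, hc⟩ := he
      have hc' : a = 2 * c := by omega
      subst hc'
      have hc0 : 0 < c := by omega
      rw [prothLoopA.eq_def]
      have hmod : PySem.Int.mod ((2 * c : Nat) : Int) 2 = 0 := by
        rw [PySem.Int.mod_eq_emod_of_pos (by omega)]; omega
      have hdiv : PySem.Int.floordiv ((2 * c : Nat) : Int) 2 = (c : Int) := by
        rw [PySem.Int.floordiv_eq_ediv_of_pos (by omega)]; omega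
      rw [dif_pos ⟨hmod, by omega⟩, hdiv, ih c (by omega) hc0 (e + 1)]
      have hL : 0 < Nat.ldiff c (c - 1) := ldiff_pos c hc0
      rw [ldiff_of_even c hc0, Nat.log2_two_mul (by omega), Prod.mk.injEq]
      refine ⟨?_, ?_⟩
      · congr 1
        rw [Nat.shiftRight_eq_div_pow, Nat.shiftRight_eq_div_pow, pow_succ]
        rw [Nat.mul_comm (2 ^ Nat.log2 (Nat.ldiff c (c - 1))) 2]
        rw [← Nat.div_div_eq_div_mul]
        congr 1
        omega
      · push_cast; ring
    · have hodd : a % 2 = 1 := Nat.odd_iff.mp ho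
      rw [prothLoopA.eq_def]
      have hmod : PySem.Int.mod ((a : Nat) : Int) 2 ≠ 0 := by
        rw [PySem.Int.mod_eq_emod_of_pos (by omega)]; omega
      rw [dif_neg (by intro h; exact hmod h.1)]
      rw [ldiff_of_odd a hodd]
      have h1 : Nat.log2 1 = 0 := rfl
      rw [h1]
      simp

-- the first component of A's loop is odd whenever it starts from a positive value
theorem prothLoopA_fst_odd (a : Nat) (ha : 0 < a) (e : Int) :
    PySem.Int.mod (prothLoopA (a : Int) e).1 2 = 1 := by
  induction a using Nat.strong_induction_on generalizing e with
  | _ a ih =>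
    rcases Nat.even_or_odd a with he | ho
    · obtain ⟨c, hc⟩ := he
      have hc' : a = 2 * c := by omega
      subst hc'
      have hc0 : 0 < c := by omega
      rw [prothLoopA.eq_def]
      have hmod : PySem.Int.mod ((2 * c : Nat) : Int) 2 = 0 := by
        rw [PySem.Int.mod_eq_emod_of_pos (by omega)]; omega
      have hdiv : PySem.Int.floordiv ((2 * c : Nat) : Int) 2 = (c : Int) := by
        rw [PySem.Int.floordiv_eq_ediv_of_pos (by omega)]; omega
      rw [dif_pos ⟨hmod, by omega⟩, hdiv]
      exact ih c (by omega) hc0 (e + 1)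
    · have hodd : a % 2 = 1 := Nat.odd_iff.mp ho
      rw [prothLoopA.eq_def]
      have hmod : PySem.Int.mod ((a : Nat) : Int) 2 ≠ 0 := by
        rw [PySem.Int.mod_eq_emod_of_pos (by omega)]; omega
      rw [dif_neg (by intro h; exact hmod h.1)]
      rw [PySem.Int.mod_eq_emod_of_pos (by omega)]
      omega

theorem land_pred_odd (a : Nat) (ha : a % 2 = 1) : a &&& (a - 1) = a - 1 := by
  apply Nat.eq_of_testBit_eq
  intro i
  cases i with
  | zero =>
    rw [Nat.testBit_land, Nat.testBit_zero, Nat.testBit_zero, ha]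
    simp
  | succ i =>
    rw [Nat.testBit_land, Nat.testBit_succ, Nat.testBit_succ]
    have h2 : (a - 1) / 2 = a / 2 := by omega
    rw [h2, Bool.and_self]

theorem land_pred_even (b : Nat) (hb : 0 < b) :
    (2 * b) &&& (2 * b - 1) = 2 * (b &&& (b - 1)) := by
  apply Nat.eq_of_testBit_eq
  intro i
  cases i with
  | zero =>
    have e1 : (2 * b) % 2 = 0 := by omega
    have e2 : (2 * (b &&& (b - 1))) % 2 = 0 := by omega
    rw [Nat.testBit_land, Nat.testBit_zero, Nat.testBit_zero, Nat.testBit_zero, e1, e2]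
    simp
  | succ i =>
    rw [Nat.testBit_land, Nat.testBit_succ, Nat.testBit_succ, Nat.testBit_succ]
    have h1 : 2 * b / 2 = b := by omega
    have h2 : (2 * b - 1) / 2 = b - 1 := by omega
    have h3 : 2 * (b &&& (b - 1)) / 2 = b &&& (b - 1) := by omega
    rw [h1, h2, h3, Nat.testBit_land]

theorem sub_land_pred (a : Nat) (ha : 0 < a) :
    a - (a &&& (a - 1)) = Nat.ldiff a (a - 1) := by
  induction a using Nat.strong_induction_on with
  | _ a ih =>
    rcases Nat.even_or_odd a with he | ho
    · obtain ⟨c, hc⟩ := he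
      have hc' : a = 2 * c := by omega
      subst hc'
      have hc0 : 0 < c := by omega
      have hih := ih c (by omega) hc0
      have hpos := ldiff_pos c hc0
      rw [land_pred_even c hc0, ldiff_of_even c hc0]
      omega
    · have hodd : a % 2 = 1 := Nat.odd_iff.mp ho
      rw [land_pred_odd a hodd, ldiff_of_odd a hodd]
      omega

-- m & -m over Int equals the Nat-level lowest set bit for positive m
theorem band_neg_eq_ldiff (a : Nat) (ha : 0 < a) :
    PySem.Int.band (a : Int) (-(a : Int)) = ((Nat.ldiff a (a - 1) : Nat) : Int) := by
  rw [PySem.Int.band]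
  have h1 : (0 : Int) ≤ (a : Int) := by omega
  have h2 : ¬ (0 : Int) ≤ -(a : Int) := by omega
  rw [if_pos h1, if_neg h2]
  have h3 : ((a : Int)).toNat = a := by omega
  have h4 : (-(-(a : Int)) - 1).toNat = a - 1 := by omega
  rw [h3, h4, sub_land_pred a ha]

-- bit_length of a positive Nat cast is log2 + 1
theorem bitLength_natCast_pos (L : Nat) (hL : 0 < L) :
    PySem.Int.bitLength (L : Int) = Nat.log2 L + 1 := by
  induction L using Nat.strong_induction_on with
  | _ L ih =>
    rw [PySem.Int.bitLength_natCast hL]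
    by_cases h2 : 2 ≤ L
    · rw [ih (L / 2) (by omega) (by omega), Nat.log2_eq_log_two, Nat.log2_eq_log_two,
        Nat.log_div_base]
      have hp : 0 < Nat.log 2 L := Nat.log_pos (by norm_num) h2
      omega
    · have hL1 : L = 1 := by omega
      subst hL1
      have h0 : ((1 : Nat) / 2 : Nat) = 0 := rfl
      rw [h0, Nat.cast_zero, PySem.Int.bitLength_zero]
      decide

-- ===== VERDICT (by name: the statement is the Claim_ definition above) =====
theorem find_proth_decomposition_py_spec : Claim_equal_find_proth_decomposition_py := by
  unfold Claim_equal_find_proth_decomposition_py Spec_find_proth_decomposition_py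
  intro n _hdom
  unfold find_proth_decomposition_py find_proth_decomposition_py_alt
  by_cases hg : n ≤ 2 ∨ PySem.Int.mod n 2 = 0
  · rw [if_pos hg, if_pos hg]
  · rw [if_neg hg, if_neg hg]
    have hn3 : 3 ≤ n := by
      rcases lt_or_ge 2 n with h | h
      · omega
      · exact absurd (Or.inl h) hg
    set a : Nat := (n - 1).toNat with hadef
    have ha : 0 < a := by omega
    have hna : n - 1 = (a : Int) := by omega
    dsimp only
    rw [hna, prothLoopA_eq a ha 0]
    have hodd := prothLoopA_fst_odd a ha 0
    rw [prothLoopA_eq a ha 0] at hodd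
    rw [if_pos hodd]
    rw [band_neg_eq_ldiff a ha]
    have hL : 0 < Nat.ldiff a (a - 1) := ldiff_pos a ha
    rw [bitLength_natCast_pos _ hL]
    set t := Nat.log2 (Nat.ldiff a (a - 1)) with htdef
    have het : (((t + 1 : Nat) : Int) - 1).toNat = t := by omega
    rw [het, Prod.mk.injEq]
    refine ⟨rfl, by push_cast; ring⟩
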